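-- pv_equiv track=rewrite | github.com/PyCQA/docformatter | src/docformatter/util.py | prefer_field_over_url
-- ===== SOURCE A (Python) =====
-- from typing import List, Tuple
--
-- def prefer_field_over_url(
--     field_idx: List[Tuple[int, int]],
--     url_idx: List[Tuple[int, int]],
-- ):
--     """Remove URL indices that overlap with field list indices.
--
--     Parameters
--     ----------
--     field_idx : list
--         The list of field list index tuples.
--     url_idx : list
--         The list of URL index tuples.
--
--     Returns
--     -------
--     url_idx : list
--         The url_idx list with any tuples that have indices overlapping with field
--         list indices removed.
--     """
--     if not field_idx:
--         return url_idx
--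
--     nonoverlapping_urls = []
--
--     any_param_start = min(e[0] for e in field_idx)
--     for _key, _value in enumerate(url_idx):
--         if _value[1] < any_param_start:
--             nonoverlapping_urls.append(_value)
--     return nonoverlapping_urls
-- ===== SOURCE B (Python) =====
-- from typing import List, Tuple
--
-- def prefer_field_over_url(
--     field_idx: List[Tuple[int, int]],
--     url_idx: List[Tuple[int, int]],
-- ):
--     """Remove URL indices that overlap with field list indices."""
--     if not field_idx:
--         return url_idx
--     return [u for u in url_idx if all(f[0] > u[1] for f in field_idx)]
-- ===== Notes on version B (the rewrite author's own statement) =====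
-- stated objective: alternative
-- what changed: Replaced the precomputed min of field starts plus accumulator loop with a single comprehension that checks every field start against each url end (all(f[0] > u[1])), dropping the reduction.
import Mathlib
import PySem

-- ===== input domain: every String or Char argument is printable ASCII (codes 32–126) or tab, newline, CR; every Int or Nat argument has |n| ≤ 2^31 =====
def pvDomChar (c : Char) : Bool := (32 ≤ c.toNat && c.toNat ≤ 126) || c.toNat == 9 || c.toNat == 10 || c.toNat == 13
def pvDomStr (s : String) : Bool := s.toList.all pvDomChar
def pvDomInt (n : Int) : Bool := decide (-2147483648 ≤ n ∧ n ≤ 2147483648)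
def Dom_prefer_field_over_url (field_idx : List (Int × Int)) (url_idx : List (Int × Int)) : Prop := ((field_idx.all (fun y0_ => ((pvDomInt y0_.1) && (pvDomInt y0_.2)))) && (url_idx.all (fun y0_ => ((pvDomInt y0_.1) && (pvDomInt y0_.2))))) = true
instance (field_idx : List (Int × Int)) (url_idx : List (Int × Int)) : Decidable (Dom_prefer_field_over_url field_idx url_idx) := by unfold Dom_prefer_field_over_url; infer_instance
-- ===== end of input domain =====

-- B replaces the min-reduction + filter loop with a single per-url all-field-starts check (alternative decomposition, same results).
-- ===== PORT A =====
-- A: guard empty field_idx; min of field starts; accumulate urls ending before it.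
def prefer_field_over_url (field_idx : List (Int × Int)) (url_idx : List (Int × Int)) : List (Int × Int) :=
  if field_idx = [] then url_idx
  else
    match PySem.List.min? (field_idx.map (fun e => e.1)) (fun x => x) with
    | none => url_idx   -- unreachable: field_idx ≠ []
    | some any_param_start =>
        url_idx.foldl (fun acc v => if v.2 < any_param_start then acc ++ [v] else acc) []

-- ===== PORT B =====
-- B: same guard; keep each url whose end precedes EVERY field start (no reduction).
def prefer_field_over_url_alt (field_idx : List (Int × Int)) (url_idx : List (Int × Int)) : List (Int × Int) :=
  if field_idx = [] then url_idx
  else url_idx.filter (fun u => field_idx.all (fun f => decide (u.2 < f.1)))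

-- ===== PRECONDITION & SPEC =====
def Spec_prefer_field_over_url (field_idx : List (Int × Int)) (url_idx : List (Int × Int)) (out : List (Int × Int)) : Prop := out = prefer_field_over_url_alt field_idx url_idx
instance (field_idx : List (Int × Int)) (url_idx : List (Int × Int)) (out : List (Int × Int)) : Decidable (Spec_prefer_field_over_url field_idx url_idx out) := by unfold Spec_prefer_field_over_url; infer_instance

-- ===== CLAIM (what is proved, stated in full; the proofs are below) =====
def Claim_equal_prefer_field_over_url : Prop := ∀ (field_idx : List (Int × Int)) (url_idx : List (Int × Int)), Dom_prefer_field_over_url field_idx url_idx → Spec_prefer_field_over_url field_idx url_idx (prefer_field_over_url field_idx url_idx)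

-- ===== LEMMAS AND PROOFS =====


theorem pfou_foldl_filter (p : Int × Int → Prop) [DecidablePred p] (l acc : List (Int × Int)) :
    l.foldl (fun acc v => if p v then acc ++ [v] else acc) acc = acc ++ l.filter (fun v => decide (p v)) := by
  induction l generalizing acc with
  | nil => simp
  | cons h t ih =>
      by_cases hp : p h <;> simp [List.foldl, List.filter, hp, ih]

theorem pfou_min_all (f : Int × Int) (fs : List (Int × Int)) (v : Int) :
    ∀ m, PySem.List.min? ((f :: fs).map (fun e => e.1)) (fun x => x) = some m →
    ((decide (v < m)) = (f :: fs).all (fun e => decide (v < e.1))) := by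
  intro m hm
  have hmem := PySem.List.min?_mem hm
  have hmin := PySem.List.min?_isMin hm
  simp only [List.mem_map] at hmem
  obtain ⟨e, he, rfl⟩ := hmem
  rw [Bool.eq_iff_iff]
  simp only [List.all_eq_true, decide_eq_true_eq]
  constructor
  · intro h x hx
    exact lt_of_lt_of_le h (hmin x.1 (List.mem_map_of_mem hx))
  · intro h; exact h e he

-- ===== VERDICT =====
theorem prefer_field_over_url_spec : Claim_equal_prefer_field_over_url := by
  intro field_idx url_idx _
  unfold Spec_prefer_field_over_url prefer_field_over_url prefer_field_over_url_alt
  rcases field_idx with _ | ⟨f, fs⟩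
  · simp
  · simp only [reduceCtorEq, if_false]
    have hex : ∃ m, PySem.List.min? ((f :: fs).map (fun e => e.1)) (fun x => x) = some m := by
      cases h : PySem.List.min? ((f :: fs).map (fun e => e.1)) (fun x => x) with
      | none => exact absurd ((PySem.List.min?_eq_none_iff _ _).mp h) (by simp)
      | some m => exact ⟨m, rfl⟩
    obtain ⟨m, hm⟩ := hex
    rw [hm]
    dsimp only
    rw [pfou_foldl_filter (fun v => v.2 < m), List.nil_append]
    congr 1
    funext v
    exact pfou_min_all f fs v.2 m hm
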